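-- pv_equiv track=rewrite | github.com/fisapool/literate-invention | fix_spots_mapping.py | get_spot_folder_from_path
-- ===== SOURCE A (Python) =====
-- def get_spot_folder_from_path(path_str):
--     """Extract spot folder name from image path."""
--     # Handle different path formats
--     path = path_str.replace('\\', '/')
--
--     # Remove common prefixes
--     prefixes = ['images/', 'scraped_data/images/', 'images\\', 'scraped_data\\images\\']
--     for prefix in prefixes:
--         if path.startswith(prefix):
--             path = path[len(prefix):]
--             break
--
--     # Look for spot_X pattern
--     if 'spot_' in path:
--         parts = path.split('/')
--         for part in parts:
--             if part.startswith('spot_'):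
--                 return part
--     return None
-- ===== SOURCE B (Python) =====
-- def get_spot_folder_from_path(path_str):
--     """Extract spot folder name from image path."""
--     i, n = 0, len(path_str)
--     while i < n:
--         if path_str.startswith('spot_', i):
--             j = i
--             while j < n and path_str[j] not in '/\\':
--                 j += 1
--             return path_str[i:j]
--         while i < n and path_str[i] not in '/\\':
--             i += 1
--         i += 1
--     return None
-- ===== Notes on version B (the rewrite author's own statement) =====
-- stated objective: alternative
-- what changed: B is a character-level two-pointer scan over the raw string: it matches 'spot_' only at segment boundaries and slices up to the next '/'/'\' separator, with no replace pass, no split, no prefix-stripping loop and no substring guard, all of which A's pipeline uses without affecting the result.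
import Mathlib
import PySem

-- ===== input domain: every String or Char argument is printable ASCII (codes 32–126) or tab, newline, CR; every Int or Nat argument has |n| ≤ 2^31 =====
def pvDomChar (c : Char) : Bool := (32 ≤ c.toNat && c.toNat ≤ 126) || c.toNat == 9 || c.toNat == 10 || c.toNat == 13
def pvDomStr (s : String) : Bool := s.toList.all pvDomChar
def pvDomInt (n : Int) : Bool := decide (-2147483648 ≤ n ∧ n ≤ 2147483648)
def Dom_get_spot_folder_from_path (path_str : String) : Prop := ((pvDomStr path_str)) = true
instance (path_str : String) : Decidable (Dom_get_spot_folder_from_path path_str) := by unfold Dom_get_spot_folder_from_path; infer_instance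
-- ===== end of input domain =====

-- B replaces A's normalize/strip/guard/split pipeline by one character-level two-pointer
-- scan of the raw string, matching 'spot_' only at segment boundaries: alternative algorithm.

-- ===== PORT A =====
def pvScanA : List String → Option String
  | [] => none
  | part :: rest => if PySem.Str.startswith part "spot_" then some part else pvScanA rest

def pvStripA : List String → String → String
  | [], path => path
  | pre :: rest, path =>
      if PySem.Str.startswith path pre then PySem.Str.slice path (some (PySem.Str.len pre)) none
      else pvStripA rest path

def get_spot_folder_from_path (path_str : String) : Option String :=
  let path := PySem.Str.replace path_str "\\" "/"
  let path := pvStripA ["images/", "scraped_data/images/", "images\\", "scraped_data\\images\\"] path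
  if PySem.Str.isIn "spot_" path then
    pvScanA ((PySem.Chars.splitOn path.toList "/".toList).map String.ofList)
  else none

-- ===== PORT B =====
-- Source B's char tests `path_str[j] not in '/\\'`
def pvNonSep (c : Char) : Bool := !(c = '/' || c = '\\')

-- Source B's outer while-loop: at a segment boundary, test startswith('spot_', i); on a hit,
-- the inner while extends j to the next separator (takeWhile) and returns the slice;
-- otherwise the second inner while skips the segment (dropWhile) and i += 1 steps past
-- the separator (tail), and the outer loop continues (the recursive call).
def pvScanAlt : List Char → Option (List Char)
  | [] => none
  | c :: t =>
      if PySem.Chars.startswith (c :: t) "spot_".toList then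
        some ((c :: t).takeWhile pvNonSep)
      else pvScanAlt (((c :: t).dropWhile pvNonSep).tail)
  termination_by l => l.length
  decreasing_by
    have := List.length_dropWhile_le pvNonSep (c :: t)
    simp only [List.length_tail]
    simp at this ⊢
    omega

def get_spot_folder_from_path_alt (path_str : String) : Option String :=
  (pvScanAlt path_str.toList).map String.ofList

-- ===== PRECONDITION & SPEC =====
def Spec_get_spot_folder_from_path (path_str : String) (out : Option String) : Prop := out = get_spot_folder_from_path_alt path_str
instance (path_str : String) (out : Option String) : Decidable (Spec_get_spot_folder_from_path path_str out) := by unfold Spec_get_spot_folder_from_path; infer_instance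

-- ===== CLAIM (what is proved, stated in full; the proofs are below) =====
def Claim_equal_get_spot_folder_from_path : Prop := ∀ (path_str : String), Dom_get_spot_folder_from_path path_str → Spec_get_spot_folder_from_path path_str (get_spot_folder_from_path path_str)

-- ===== LEMMAS AND PROOFS =====

-- s.replace('\\','/') character-wise
def pvNorm (c : Char) : Char := if c = '\\' then '/' else c

-- split on '/' as plain structural recursion
def pvSplitC : List Char → List (List Char)
  | [] => [[]]
  | c :: t =>
      if c = '/' then [] :: pvSplitC t
      else
        match pvSplitC t with
        | [] => [[c]]
        | h :: r => (c :: h) :: r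

def pvConsHead (pre : List Char) : List (List Char) → List (List Char)
  | [] => [pre]
  | h :: r => (pre ++ h) :: r

def pvScanC : List (List Char) → Option (List Char)
  | [] => none
  | h :: r => if PySem.Chars.startswith h "spot_".toList then some h else pvScanC r

theorem pv_replace_go (l : List Char) : ∀ (fuel : Nat) (acc : List Char), l.length ≤ fuel →
    PySem.Chars.replace.go ['\\'] ['/'] fuel l acc = acc.reverse ++ l.map pvNorm := by
  induction l with
  | nil => intro fuel acc _; cases fuel <;> rw [PySem.Chars.replace.go] <;> simp
  | cons c t ih =>
      intro fuel acc hf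
      cases fuel with
      | zero => simp at hf
      | succ f =>
          rw [PySem.Chars.replace.go]
          by_cases hc : c = '\\'
          · subst hc
            rw [if_pos (by simp [List.isPrefixOf])]
            show PySem.Chars.replace.go ['\\'] ['/'] f t ('/' :: acc) = _
            rw [ih f _ (by simpa using hf)]
            simp [pvNorm]
          · rw [if_neg (by simp [List.isPrefixOf]; exact fun h => absurd h.symm hc)]
            rw [ih f _ (by simpa using hf)]
            simp [pvNorm, hc]

theorem pv_replace_eq (l : List Char) :
    PySem.Chars.replace l ['\\'] ['/'] = l.map pvNorm := by
  unfold PySem.Chars.replace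
  rw [if_neg (by simp)]
  rw [pv_replace_go l l.length [] (le_refl _)]
  simp

theorem pv_no_backslash (l : List Char) : '\\' ∉ l.map pvNorm := by
  intro h
  rcases List.mem_map.mp h with ⟨c, _, hc⟩
  by_cases h' : c = '\\' <;> simp [pvNorm, h'] at hc

theorem pvSplitC_ne_nil (l : List Char) : pvSplitC l ≠ [] := by
  cases l with
  | nil => simp [pvSplitC]
  | cons c t =>
      simp only [pvSplitC]
      split_ifs
      · simp
      · rcases h : pvSplitC t with _ | ⟨h', r⟩ <;> simp

theorem pv_splitOn_go (l : List Char) : ∀ (fuel : Nat) (cur : List Char) (acc : List (List Char)),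
    l.length ≤ fuel →
    PySem.Chars.splitOn.go ['/'] fuel l cur acc = acc.reverse ++ pvConsHead cur.reverse (pvSplitC l) := by
  induction l with
  | nil =>
      intro fuel cur acc _
      cases fuel <;> rw [PySem.Chars.splitOn.go] <;> simp [pvSplitC, pvConsHead]
  | cons c t ih =>
      intro fuel cur acc hf
      cases fuel with
      | zero => simp at hf
      | succ f =>
          rw [PySem.Chars.splitOn.go]
          by_cases hc : c = '/'
          · subst hc
            rw [if_pos (by simp [List.isPrefixOf])]
            simp only [List.length_singleton, List.drop_succ_cons, List.drop_zero]
            rw [ih f _ _ (by simpa using hf)]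
            rcases h : pvSplitC t with _ | ⟨hd, r⟩
            · exact absurd h (pvSplitC_ne_nil t)
            · simp [pvSplitC, pvConsHead, h]
          · rw [if_neg (by simp [List.isPrefixOf]; exact fun h => absurd h.symm hc)]
            rw [ih f _ _ (by simpa using hf)]
            simp only [pvSplitC, if_neg hc]
            rcases h : pvSplitC t with _ | ⟨hd, r⟩
            · exact absurd h (pvSplitC_ne_nil t)
            · simp [pvConsHead]

theorem pv_splitOn_eq (l : List Char) : PySem.Chars.splitOn l ['/'] = pvSplitC l := by
  unfold PySem.Chars.splitOn
  rw [pv_splitOn_go l (l.length + 1) [] [] (by omega)]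
  rcases h : pvSplitC l with _ | ⟨hd, r⟩
  · exact absurd h (pvSplitC_ne_nil l)
  · simp [pvConsHead]

theorem pv_split_append {a : List Char} (r : List Char) (ha : '/' ∉ a) :
    pvSplitC (a ++ '/' :: r) = a :: pvSplitC r := by
  induction a with
  | nil => simp [pvSplitC]
  | cons c a' ih =>
      have hc : c ≠ '/' := fun h => ha (h ▸ List.mem_cons_self ..)
      have ih' := ih (fun h => ha (List.mem_cons_of_mem _ h))
      simp only [List.cons_append, pvSplitC, if_neg hc, ih']

theorem pvSplitC_head_prefix (l : List Char) : ∃ h r, pvSplitC l = h :: r ∧ h <+: l := by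
  induction l with
  | nil => exact ⟨[], [], rfl, List.prefix_refl _⟩
  | cons c t ih =>
      rcases ih with ⟨h, r, he, hp⟩
      by_cases hc : c = '/'
      · exact ⟨[], pvSplitC t, by simp [pvSplitC, hc], List.nil_prefix⟩
      · exact ⟨c :: h, r, by simp [pvSplitC, hc, he], List.cons_prefix_cons.mpr ⟨rfl, hp⟩⟩

theorem pv_mem_split_infix {q : List Char} (l : List Char) (hm : q ∈ pvSplitC l) : q <:+: l := by
  induction l with
  | nil => simp [pvSplitC] at hm; simp [hm]
  | cons c t ih =>
      by_cases hc : c = '/'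
      · subst hc
        have hm' : q = [] ∨ q ∈ pvSplitC t := by
          have he : pvSplitC ('/' :: t) = [] :: pvSplitC t := by simp [pvSplitC]
          rw [he] at hm
          simpa using hm
        rcases hm' with rfl | hm'
        · exact List.nil_infix
        · exact List.infix_cons (ih hm')
      · rcases pvSplitC_head_prefix t with ⟨h, r, he, hp⟩
        simp only [pvSplitC, if_neg hc, he, List.mem_cons] at hm
        rcases hm with rfl | hm
        · exact List.IsPrefix.isInfix (List.cons_prefix_cons.mpr ⟨rfl, hp⟩)
        · exact List.infix_cons (ih (he ▸ List.mem_cons_of_mem _ hm))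

theorem pv_scanC_some {ps : List (List Char)} {q : List Char} (hs : pvScanC ps = some q) :
    q ∈ ps ∧ "spot_".toList <+: q := by
  induction ps with
  | nil => simp [pvScanC] at hs
  | cons h r ih =>
      simp only [pvScanC] at hs
      split_ifs at hs with hst
      · cases hs
        exact ⟨List.mem_cons_self .., (PySem.Chars.startswith_iff _ _).mp hst⟩
      · rcases ih hs with ⟨hm, hp⟩
        exact ⟨List.mem_cons_of_mem _ hm, hp⟩

theorem pv_guard_none {l : List Char} (hg : PySem.Chars.isIn "spot_".toList l = false) :
    pvScanC (pvSplitC l) = none := by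
  rcases h : pvScanC (pvSplitC l) with _ | q
  · rfl
  · rcases pv_scanC_some h with ⟨hm, hp⟩
    have : "spot_".toList <:+: l := hp.isInfix.trans (pv_mem_split_infix l hm)
    rw [(PySem.Chars.isIn_iff_infix _ _).mpr this] at hg
    cases hg

theorem pv_scanA_bridge (ps : List (List Char)) :
    pvScanA (ps.map String.ofList) = (pvScanC ps).map String.ofList := by
  induction ps with
  | nil => rfl
  | cons h r ih =>
      simp only [List.map_cons, pvScanA, pvScanC, PySem.Str.startswith_eq, String.toList_ofList]
      split_ifs <;> simp [ih]

-- A's branch body with guard and scan, at the list level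
theorem pv_branch (path : String) :
    (if PySem.Str.isIn "spot_" path then
       pvScanA ((PySem.Chars.splitOn path.toList "/".toList).map String.ofList)
     else none) = (pvScanC (pvSplitC path.toList)).map String.ofList := by
  have hsp : ("/".toList : List Char) = ['/'] := rfl
  rw [hsp, pv_splitOn_eq, pv_scanA_bridge]
  rcases hg : PySem.Str.isIn "spot_" path with _ | _
  · have : PySem.Chars.isIn "spot_".toList path.toList = false := by
      rw [← PySem.Str.isIn_eq]; exact hg
    rw [pv_guard_none this]; rfl
  · rfl

-- ===== B-side bridge: the char-level scan equals scan-of-split of the normalized chars =====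

theorem pv_dropWhile_head {p : Char → Bool} (l : List Char) : ∀ {d : Char} {r : List Char},
    l.dropWhile p = d :: r → p d = false := by
  induction l with
  | nil => intro d r h; simp [List.dropWhile] at h
  | cons c t ih =>
      intro d r h
      by_cases hc : p c
      · rw [List.dropWhile_cons_of_pos hc] at h; exact ih h
      · rw [List.dropWhile_cons_of_neg hc] at h
        cases h; simpa using hc

theorem pv_prefix_takeWhile {p : Char → Bool} : ∀ (pre l : List Char),
    (∀ x ∈ pre, p x = true) → pre <+: l → pre <+: l.takeWhile p := by
  intro pre
  induction pre with
  | nil => intro l _ _; exact List.nil_prefix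
  | cons a pre' ih =>
      intro l hall hp
      rcases l with _ | ⟨c, t⟩
      · simp at hp
      · rcases List.cons_prefix_cons.mp hp with ⟨rfl, hp'⟩
        have ha : p a = true := hall a (List.mem_cons_self ..)
        rw [List.takeWhile_cons_of_pos ha]
        exact List.cons_prefix_cons.mpr
          ⟨rfl, ih t (fun x hx => hall x (List.mem_cons_of_mem _ hx)) hp'⟩

theorem pv_map_seg (l : List Char) : (l.takeWhile pvNonSep).map pvNorm = l.takeWhile pvNonSep := by
  have : ∀ x ∈ l.takeWhile pvNonSep, pvNorm x = x := by
    intro x hx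
    have := List.mem_takeWhile_imp hx
    simp [pvNonSep] at this
    simp [pvNorm, this.2]
  calc (l.takeWhile pvNonSep).map pvNorm = (l.takeWhile pvNonSep).map id :=
        List.map_congr_left this
    _ = _ := List.map_id _

theorem pv_seg_no_slash (l : List Char) : '/' ∉ l.takeWhile pvNonSep := by
  intro h
  have := List.mem_takeWhile_imp h
  simp [pvNonSep] at this

theorem pvSplitC_no_sep : ∀ (l : List Char), '/' ∉ l → pvSplitC l = [l] := by
  intro l
  induction l with
  | nil => intro _; rfl
  | cons c t ih =>
      intro h
      have hc : c ≠ '/' := fun hc => h (hc ▸ List.mem_cons_self ..)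
      have := ih (fun hm => h (List.mem_cons_of_mem _ hm))
      simp [pvSplitC, hc, this]

theorem pv_sw_seg (l : List Char) :
    PySem.Chars.startswith l "spot_".toList =
      PySem.Chars.startswith (l.takeWhile pvNonSep) "spot_".toList := by
  rcases h : PySem.Chars.startswith l "spot_".toList with _ | _
  · rcases h' : PySem.Chars.startswith (l.takeWhile pvNonSep) "spot_".toList with _ | _
    · rfl
    · exfalso
      have hp := (PySem.Chars.startswith_iff _ _).mp h'
      have : "spot_".toList <+: l := hp.trans (List.takeWhile_prefix _)
      rw [(PySem.Chars.startswith_iff _ _).mpr this] at h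
      cases h
  · have hp := (PySem.Chars.startswith_iff _ _).mp h
    have hall : ∀ x ∈ "spot_".toList, pvNonSep x = true := List.all_eq_true.mp (by decide)
    exact ((PySem.Chars.startswith_iff _ _).mpr (pv_prefix_takeWhile _ l hall hp)).symm

theorem pvScanAlt_eq_aux : ∀ (n : Nat) (l : List Char), l.length ≤ n →
    pvScanAlt l = pvScanC (pvSplitC (l.map pvNorm)) := by
  intro n
  induction n with
  | zero =>
      intro l h
      have : l = [] := List.eq_nil_of_length_eq_zero (Nat.le_zero.mp h)
      subst this; simp only [pvScanAlt]; decide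
  | succ n ih =>
      intro l hlen
      rcases l with _ | ⟨c, t⟩
      · simp only [pvScanAlt]; decide
      · rw [pvScanAlt]
        have hsplit := List.takeWhile_append_dropWhile (p := pvNonSep) (l := c :: t)
        set seg := (c :: t).takeWhile pvNonSep with hseg
        rcases hrest : (c :: t).dropWhile pvNonSep with _ | ⟨d, r⟩
        · -- no separator: whole list is one segment
          have hl : (c :: t) = seg := by rw [← hsplit, hrest, List.append_nil]
          have hmap : (c :: t).map pvNorm = seg := by rw [hl, hseg]; exact pv_map_seg _
          rw [hmap, pvSplitC_no_sep seg (hseg ▸ pv_seg_no_slash (c :: t))]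
          rw [pv_sw_seg (c :: t), ← hseg]
          simp only [pvScanC, hseg]
          split_ifs <;> simp [pvScanAlt]
        · -- separator d, remaining r
          have hd : pvNonSep d = false := pv_dropWhile_head _ hrest
          have hdn : pvNorm d = '/' := by
            by_cases h : d = '/'
            · rw [h]; decide
            · have hb : d = '\\' := by simpa [pvNonSep, h] using hd
              rw [hb]; decide
          have hmap : (c :: t).map pvNorm = seg ++ '/' :: r.map pvNorm := by
            rw [← hsplit, hrest, List.map_append, List.map_cons, hdn, hseg, pv_map_seg]
          have hrlen : r.length ≤ n := by
            have h1 : seg.length + (d :: r).length = (c :: t).length := by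
              rw [← hsplit, hrest]; simp
            simp at h1 hlen; omega
          rw [hmap, pv_split_append _ (hseg ▸ pv_seg_no_slash (c :: t))]
          rw [pv_sw_seg (c :: t), ← hseg]
          simp only [pvScanC, List.tail_cons]
          split_ifs
          · rfl
          · exact ih r hrlen

theorem pv_toList_norm (s : String) :
    (PySem.Str.replace s "\\" "/").toList = s.toList.map pvNorm := by
  rw [PySem.Str.toList_replace]
  exact pv_replace_eq s.toList

theorem pv_B_eq (s : String) :
    get_spot_folder_from_path_alt s =
      (pvScanC (pvSplitC ((PySem.Str.replace s "\\" "/").toList))).map String.ofList := by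
  unfold get_spot_folder_from_path_alt
  rw [pvScanAlt_eq_aux s.toList.length s.toList le_rfl, pv_toList_norm]

theorem pv_sw_no_bs (s : String) (p : String) (hbs : '\\' ∈ p.toList) :
    PySem.Str.startswith (PySem.Str.replace s "\\" "/") p = false := by
  rcases h : PySem.Str.startswith (PySem.Str.replace s "\\" "/") p with _ | _
  · rfl
  · exfalso
    rw [PySem.Str.startswith_eq] at h
    have hp := (PySem.Chars.startswith_iff _ _).mp h
    have : '\\' ∈ (PySem.Str.replace s "\\" "/").toList := hp.subset hbs
    rw [pv_toList_norm] at this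
    exact pv_no_backslash _ this

theorem pv_slice_drop (t : String) (k : Nat) :
    (PySem.Str.slice t (some (k : Int)) none).toList = t.toList.drop k := by
  rw [PySem.Str.toList_slice, PySem.Chars.slice_eq_listSlice, PySem.List.slice_from _ (by positivity)]
  simp

theorem pv_strip_scan (a r : List Char) (ha : '/' ∉ a)
    (hsw : PySem.Chars.startswith a "spot_".toList = false) :
    pvScanC (pvSplitC (a ++ '/' :: r)) = pvScanC (pvSplitC r) := by
  rw [pv_split_append r ha]
  simp only [pvScanC]
  rw [hsw]
  simp

-- ===== VERDICT (by name: the statement is the Claim_ definition above) =====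
theorem get_spot_folder_from_path_spec : Claim_equal_get_spot_folder_from_path := by
  intro s _
  unfold Spec_get_spot_folder_from_path
  rw [pv_B_eq]
  unfold get_spot_folder_from_path
  simp only [pvStripA]
  rw [pv_sw_no_bs s "images\\" (by decide), pv_sw_no_bs s "scraped_data\\images\\" (by decide)]
  set t := PySem.Str.replace s "\\" "/" with ht
  by_cases h1 : PySem.Str.startswith t "images/" = true
  · rw [if_pos h1]
    obtain ⟨r, hr⟩ : ∃ r, "images/".toList ++ r = t.toList := by
      rw [PySem.Str.startswith_eq] at h1
      exact (PySem.Chars.startswith_iff _ _).mp h1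
    have hlen : PySem.Str.len "images/" = ((7 : Nat) : Int) := by decide
    have hsl : (PySem.Str.slice t (some (PySem.Str.len "images/")) none).toList = r := by
      rw [hlen, pv_slice_drop t 7, ← hr,
        show (7 : Nat) = ("images/".toList).length from rfl, List.drop_left]
    rw [pv_branch, hsl, ← hr,
      show ("images/".toList ++ r : List Char) = "images".toList ++ '/' :: r from rfl,
      pv_strip_scan "images".toList r (by decide) (by decide)]
  · rw [if_neg h1]
    by_cases h2 : PySem.Str.startswith t "scraped_data/images/" = true
    · rw [if_pos h2]
      obtain ⟨r, hr⟩ : ∃ r, "scraped_data/images/".toList ++ r = t.toList := by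
        rw [PySem.Str.startswith_eq] at h2
        exact (PySem.Chars.startswith_iff _ _).mp h2
      have hlen : PySem.Str.len "scraped_data/images/" = ((20 : Nat) : Int) := by decide
      have hsl : (PySem.Str.slice t (some (PySem.Str.len "scraped_data/images/")) none).toList = r := by
        rw [hlen, pv_slice_drop t 20, ← hr,
          show (20 : Nat) = ("scraped_data/images/".toList).length from rfl, List.drop_left]
      rw [pv_branch, hsl, ← hr,
        show ("scraped_data/images/".toList ++ r : List Char) =
          "scraped_data".toList ++ '/' :: ("images".toList ++ '/' :: r) from rfl,
        pv_strip_scan "scraped_data".toList _ (by decide) (by decide),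
        pv_strip_scan "images".toList r (by decide) (by decide)]
    · rw [if_neg h2, if_neg Bool.false_ne_true, if_neg Bool.false_ne_true, pv_branch]
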